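-- pv_equiv track=rewrite | github.com/dakaeng/Algorithm | 프로그래머스/1/86491. 최소직사각형/최소직사각형.py | solution
-- ===== SOURCE A (Python) =====
-- def solution(sizes):
--     # 가로 길이 중 최댓값, 세로 길이 중 최댓값
--     # 단, 가로 세로를 바꿀 수 있음
--     w_max = 0
--     h_max = 0
--     for s in sizes :
--         w = s[0]
--         h = s[1]
--         if w < h :
--             w, h = h, w
--         w_max = max(w_max, w)
--         h_max = max(h_max, h)
--     return (w_max * h_max)
-- ===== SOURCE B (Python) =====
-- def solution(sizes):
--     # divide and conquer: rect(xs) = (max rotated width, max rotated height) of xs,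
--     # floored at 0 (side lengths are non-negative, matching A's zero-started maxima)
--     def rect(xs):
--         if len(xs) <= 1:
--             if not xs:
--                 return (0, 0)
--             s = xs[0]
--             return (max(max(s[0], s[1]), 0), max(min(s[0], s[1]), 0))
--         mid = len(xs) // 2
--         w1, h1 = rect(xs[:mid])
--         w2, h2 = rect(xs[mid:])
--         return (max(w1, w2), max(h1, h2))
--     w, h = rect(sizes)
--     return w * h
-- ===== Notes on version B (the rewrite author's own statement) =====
-- stated objective: alternative
-- what changed: Replaces A's single fused accumulator loop with a divide-and-conquer recursion that splits the list at the midpoint, computes (max rotated width, max rotated height) of each half, and merges them.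
import Mathlib
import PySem

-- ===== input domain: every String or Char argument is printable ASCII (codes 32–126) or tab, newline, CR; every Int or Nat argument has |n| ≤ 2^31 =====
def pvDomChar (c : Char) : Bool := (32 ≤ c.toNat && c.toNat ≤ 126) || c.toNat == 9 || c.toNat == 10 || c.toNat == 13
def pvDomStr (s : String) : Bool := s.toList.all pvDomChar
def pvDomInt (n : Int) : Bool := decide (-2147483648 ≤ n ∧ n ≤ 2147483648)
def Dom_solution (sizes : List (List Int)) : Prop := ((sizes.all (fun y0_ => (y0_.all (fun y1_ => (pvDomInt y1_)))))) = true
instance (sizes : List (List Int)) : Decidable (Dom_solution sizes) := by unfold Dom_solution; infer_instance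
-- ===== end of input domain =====

-- B replaces A's fused loop with a divide-and-conquer recursion on midpoint slices; objective: alternative (same result, different algorithm shape).


-- ===== PORT A =====
-- literal port of A's loop: state (w_max, h_max); s[0]/s[1] via pyGet?
-- (the .getD 0 default is unreachable under Pre_solution, which demands rows of length ≥ 2)
def solution (sizes : List (List Int)) : Int :=
  let st := sizes.foldl (fun (st : Int × Int) s =>
    let w := (PySem.List.pyGet? s 0).getD 0
    let h := (PySem.List.pyGet? s 1).getD 0
    let (w, h) := if w < h then (h, w) else (w, h)
    (max st.1 w, max st.2 h)) (0, 0)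
  st.1 * st.2

-- ===== PORT B =====
-- port of Source B's rect: divide and conquer on midpoint slices (xs[:mid] / xs[mid:] as take/drop)
def rectAlt (xs : List (List Int)) : Int × Int :=
  if h1 : xs.length ≤ 1 then
    match xs with
    | [] => (0, 0)
    | s :: _ =>
      (max (max ((PySem.List.pyGet? s 0).getD 0) ((PySem.List.pyGet? s 1).getD 0)) 0,
       max (min ((PySem.List.pyGet? s 0).getD 0) ((PySem.List.pyGet? s 1).getD 0)) 0)
  else
    let mid := xs.length / 2
    let p1 := rectAlt (xs.take mid)
    let p2 := rectAlt (xs.drop mid)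
    (max p1.1 p2.1, max p1.2 p2.2)
termination_by xs.length
decreasing_by
  · simp only [List.length_take]; omega
  · simp only [List.length_drop]; omega

def solution_alt (sizes : List (List Int)) : Int :=
  let p := rectAlt sizes
  p.1 * p.2

-- ===== PRECONDITION & SPEC =====
-- A raises IndexError on s[0]/s[1] when some row has fewer than 2 entries; Pre_ excludes exactly that.
def Pre_solution (sizes : List (List Int)) : Prop := ∀ s ∈ sizes, 2 ≤ s.length
instance (sizes : List (List Int)) : Decidable (Pre_solution sizes) := by unfold Pre_solution; infer_instance
def pvWitness_solution : List (List Int) := [[60, 50], [30, 70], [60, 30], [80, 40]]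
def Spec_solution (sizes : List (List Int)) (out : Int) : Prop := out = solution_alt sizes
instance (sizes : List (List Int)) (out : Int) : Decidable (Spec_solution sizes out) := by unfold Spec_solution; infer_instance

-- ===== CLAIM (what is proved, stated in full; the proofs are below) =====
def Claim_equal_solution : Prop := ∀ (sizes : List (List Int)), Dom_solution sizes → Pre_solution sizes → Spec_solution sizes (solution sizes)

-- ===== LEMMAS AND PROOFS =====
-- abbreviations for the rotated width/height of a row
def pvW (s : List Int) : Int := max ((PySem.List.pyGet? s 0).getD 0) ((PySem.List.pyGet? s 1).getD 0)
def pvH (s : List Int) : Int := min ((PySem.List.pyGet? s 0).getD 0) ((PySem.List.pyGet? s 1).getD 0)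

theorem foldl_max_init (l : List Int) : ∀ a b : Int, l.foldl max (max a b) = max a (l.foldl max b) := by
  induction l with
  | nil => intro a b; rfl
  | cons x t ih =>
    intro a b
    simp only [List.foldl, max_assoc]
    exact ih a (max b x)

theorem foldl_max_append (l1 l2 : List Int) :
    (l1 ++ l2).foldl max 0 = max (l1.foldl max 0) (l2.foldl max 0) := by
  rw [List.foldl_append]
  have hle : ∀ (l : List Int) (a : Int), a ≤ l.foldl max a := by
    intro l
    induction l with
    | nil => intro a; exact le_refl a
    | cons x t ih => intro a; exact le_trans (le_max_left a x) (ih (max a x))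
  have h0 : l1.foldl max 0 = max (l1.foldl max 0) 0 := by
    have := hle l1 0; omega
  conv_lhs => rw [h0]
  rw [foldl_max_init]

-- B's divide-and-conquer computes the two zero-seeded max-folds
theorem rectAlt_eq_aux (n : Nat) : ∀ (xs : List (List Int)), xs.length ≤ n →
    rectAlt xs = ((xs.map pvW).foldl max 0, (xs.map pvH).foldl max 0) := by
  induction n with
  | zero =>
    intro xs hn
    have : xs = [] := List.length_eq_zero_iff.mp (Nat.le_zero.mp hn)
    subst this; simp [rectAlt]
  | succ n ih =>
    intro xs hn
    rw [rectAlt]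
    by_cases h1 : xs.length ≤ 1
    · rw [dif_pos h1]
      match xs, h1 with
      | [], _ => rfl
      | [s], _ =>
        simp only [List.map, List.foldl, pvW, pvH]
        rw [Prod.mk.injEq]
        exact ⟨max_comm _ _, max_comm _ _⟩
    · rw [dif_neg h1]
      show (max (rectAlt (xs.take (xs.length / 2))).1 (rectAlt (xs.drop (xs.length / 2))).1,
            max (rectAlt (xs.take (xs.length / 2))).2 (rectAlt (xs.drop (xs.length / 2))).2) = _
      have hmid1 : 1 ≤ xs.length / 2 := by omega
      have hmid2 : xs.length / 2 < xs.length := by omega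
      rw [ih (xs.take (xs.length / 2)) (by simp [List.length_take]; omega),
          ih (xs.drop (xs.length / 2)) (by simp [List.length_drop]; omega)]
      have hW := foldl_max_append ((xs.take (xs.length / 2)).map pvW) ((xs.drop (xs.length / 2)).map pvW)
      have hH := foldl_max_append ((xs.take (xs.length / 2)).map pvH) ((xs.drop (xs.length / 2)).map pvH)
      rw [← List.map_append, List.take_append_drop] at hW hH
      simp [hW, hH]

theorem rectAlt_eq (xs : List (List Int)) :
    rectAlt xs = ((xs.map pvW).foldl max 0, (xs.map pvH).foldl max 0) :=
  rectAlt_eq_aux xs.length xs le_rfl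

-- loop invariant: A's fused fold computes the pair of the two max-folds, for any start pair
theorem solution_fold_pair (sizes : List (List Int)) (a b : Int) :
    sizes.foldl (fun (st : Int × Int) s =>
      let w := (PySem.List.pyGet? s 0).getD 0
      let h := (PySem.List.pyGet? s 1).getD 0
      let (w, h) := if w < h then (h, w) else (w, h)
      (max st.1 w, max st.2 h)) (a, b)
    = ((sizes.map pvW).foldl max a, (sizes.map pvH).foldl max b) := by
  induction sizes generalizing a b with
  | nil => rfl
  | cons s rest ih =>
    simp only [List.foldl, List.map]
    rw [← ih]
    congr 1
    by_cases h : (PySem.List.pyGet? s 0).getD 0 < (PySem.List.pyGet? s 1).getD 0 <;>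
      simp [h, pvW, pvH, min_def, max_def] <;> omega

-- ===== VERDICT (by name: the statement is the Claim_ definition above) =====
theorem solution_spec : Claim_equal_solution := by
  intro sizes _ _
  unfold Spec_solution solution solution_alt
  rw [solution_fold_pair, rectAlt_eq]
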